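-- pv_equiv track=rewrite | github.com/dianamonea/Shannon-production-schedule | python/shannon/mapf/gnn_conflict_predictor.py | extract_labels_from_conflicts
-- ===== SOURCE A (Python) =====
-- from typing import Dict, List, Optional, Tuple, Set
--
-- def extract_labels_from_conflicts(
--                                  conflicts: List[Tuple[str, str]],
--                                  agent_id_to_idx: Dict[str, int],
--                                  all_edges: List[Tuple[int, int]]
--                                  ) -> Dict[Tuple[int, int], int]:
--     """Convert detected conflicts to training labels."""
--     labels = {e: 0 for e in all_edges}
--
--     for aid1, aid2 in conflicts:
--         i = agent_id_to_idx.get(aid1)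
--         j = agent_id_to_idx.get(aid2)
--
--         if i is not None and j is not None:
--             key = (min(i, j), max(i, j))
--             if key in labels:
--                 labels[key] = 1
--
--     return labels
-- ===== SOURCE B (Python) =====
-- def extract_labels_from_conflicts(conflicts, agent_id_to_idx, all_edges):
--     """Convert detected conflicts to training labels."""
--     def is_conflict_edge(e):
--         for aid1, aid2 in conflicts:
--             i = agent_id_to_idx.get(aid1)
--             j = agent_id_to_idx.get(aid2)
--             if i is not None and j is not None and (min(i, j), max(i, j)) == e:
--                 return True
--         return False
--     return {e: (1 if is_conflict_edge(e) else 0) for e in all_edges}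
-- ===== Notes on version B (the rewrite author's own statement) =====
-- stated objective: alternative
-- what changed: A is conflict-major: it pre-zeroes a labels dict and mutates entries to 1 while scanning conflicts; B is edge-major and purely functional: for each edge it scans the conflicts with a predicate is_conflict_edge and builds the labels in one dict comprehension, trading O(|edges|+|conflicts|) time for O(|edges|*|conflicts|) with no mutation.
import Mathlib
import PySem

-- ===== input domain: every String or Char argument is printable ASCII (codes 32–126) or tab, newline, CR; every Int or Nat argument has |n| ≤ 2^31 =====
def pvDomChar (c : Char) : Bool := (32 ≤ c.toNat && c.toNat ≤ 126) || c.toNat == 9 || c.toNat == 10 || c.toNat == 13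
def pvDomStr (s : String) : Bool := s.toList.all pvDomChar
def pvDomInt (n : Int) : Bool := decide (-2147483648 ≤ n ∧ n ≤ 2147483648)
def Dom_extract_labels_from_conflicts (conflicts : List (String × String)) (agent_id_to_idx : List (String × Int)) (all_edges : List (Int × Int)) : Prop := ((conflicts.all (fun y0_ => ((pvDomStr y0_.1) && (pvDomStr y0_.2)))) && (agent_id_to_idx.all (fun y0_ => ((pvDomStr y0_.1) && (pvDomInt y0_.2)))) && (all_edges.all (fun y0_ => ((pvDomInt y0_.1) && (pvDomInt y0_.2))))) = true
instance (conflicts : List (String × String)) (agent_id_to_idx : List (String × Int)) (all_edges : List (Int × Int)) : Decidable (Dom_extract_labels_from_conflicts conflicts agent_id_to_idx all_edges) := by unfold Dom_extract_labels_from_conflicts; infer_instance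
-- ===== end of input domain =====

-- B replaces A's conflict-major mutate-a-zeroed-dict strategy with an edge-major pure pass:
-- for each edge a predicate scans the conflicts, and one comprehension builds the labels
-- (objective: alternative; B does more work per edge but no mutation).


-- ===== PORT A =====
-- one iteration of A's 'for aid1, aid2 in conflicts' loop over the labels dict
def pvAStep (agents : PySem.Dict String Int) (L : PySem.Dict (Int × Int) Int) (p : String × String) : PySem.Dict (Int × Int) Int :=
  match agents.get? p.1, agents.get? p.2 with
  | some i, some j =>
      let key : Int × Int := (min i j, max i j)
      if L.contains key then L.insert key 1 else L
  | _, _ => L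

def extract_labels_from_conflicts (conflicts : List (String × String)) (agent_id_to_idx : List (String × Int)) (all_edges : List (Int × Int)) : List (Int × Int × Int) :=
  let agents : PySem.Dict String Int := PySem.Dict.mk agent_id_to_idx
  let labels0 : PySem.Dict (Int × Int) Int := all_edges.foldl (fun L e => L.insert e 0) PySem.Dict.empty
  let labels := conflicts.foldl (pvAStep agents) labels0
  labels.items.map (fun q => (q.1.1, q.1.2, q.2))

-- ===== PORT B =====
-- B's inner helper: 'is_conflict_edge(e)' — a for-loop with early 'return True' = List.any
def pvIsConflictEdge (agents : PySem.Dict String Int) (conflicts : List (String × String)) (e : Int × Int) : Bool :=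
  conflicts.any (fun p =>
    match agents.get? p.1, agents.get? p.2 with
    | some i, some j => decide ((min i j, max i j) = e)
    | _, _ => false)

def extract_labels_from_conflicts_alt (conflicts : List (String × String)) (agent_id_to_idx : List (String × Int)) (all_edges : List (Int × Int)) : List (Int × Int × Int) :=
  let agents : PySem.Dict String Int := PySem.Dict.mk agent_id_to_idx
  (PySem.Dict.ofList (all_edges.map (fun e => (e, if pvIsConflictEdge agents conflicts e then (1 : Int) else 0)))).items.map
    (fun q => (q.1.1, q.1.2, q.2))

-- ===== PRECONDITION & SPEC =====
def Spec_extract_labels_from_conflicts (conflicts : List (String × String)) (agent_id_to_idx : List (String × Int)) (all_edges : List (Int × Int)) (out : List (Int × Int × Int)) : Prop := out = extract_labels_from_conflicts_alt conflicts agent_id_to_idx all_edges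
instance (conflicts : List (String × String)) (agent_id_to_idx : List (String × Int)) (all_edges : List (Int × Int)) (out : List (Int × Int × Int)) : Decidable (Spec_extract_labels_from_conflicts conflicts agent_id_to_idx all_edges out) := by unfold Spec_extract_labels_from_conflicts; infer_instance

-- ===== CLAIM (what is proved, stated in full; the proofs are below) =====
def Claim_equal_extract_labels_from_conflicts : Prop := ∀ (conflicts : List (String × String)) (agent_id_to_idx : List (String × Int)) (all_edges : List (Int × Int)), Dom_extract_labels_from_conflicts conflicts agent_id_to_idx all_edges → Spec_extract_labels_from_conflicts conflicts agent_id_to_idx all_edges (extract_labels_from_conflicts conflicts agent_id_to_idx all_edges)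

-- ===== LEMMAS AND PROOFS =====

-- the normalized conflict key (min,max) that one conflict pair contributes, if both agents resolve
def pvCKey (agents : PySem.Dict String Int) (p : String × String) : Option (Int × Int) :=
  match agents.get? p.1, agents.get? p.2 with
  | some i, some j => some (min i j, max i j)
  | _, _ => none

theorem pvAStep_eq (agents : PySem.Dict String Int) (L : PySem.Dict (Int × Int) Int) (p : String × String) :
    pvAStep agents L p = match pvCKey agents p with
      | some k => if L.contains k then L.insert k 1 else L
      | none => L := by
  unfold pvAStep pvCKey
  cases agents.get? p.1 <;> cases agents.get? p.2 <;> rfl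

-- B's predicate holds exactly when some conflict resolves to the key e
theorem pvIsConflictEdge_iff (agents : PySem.Dict String Int) (conflicts : List (String × String)) (e : Int × Int) :
    pvIsConflictEdge agents conflicts e = true ↔ ∃ p ∈ conflicts, pvCKey agents p = some e := by
  unfold pvIsConflictEdge
  rw [List.any_eq_true]
  constructor
  · rintro ⟨p, hp, hb⟩
    refine ⟨p, hp, ?_⟩
    unfold pvCKey
    cases h1 : agents.get? p.1 <;> cases h2 : agents.get? p.2 <;> rw [h1, h2] at hb <;>
      simp_all
  · rintro ⟨p, hp, hk⟩
    refine ⟨p, hp, ?_⟩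
    unfold pvCKey at hk
    cases h1 : agents.get? p.1 <;> cases h2 : agents.get? p.2 <;> rw [h1, h2] at hk <;>
      simp_all

-- one A-step does not change membership of any key
theorem contains_pvAStep (agents : PySem.Dict String Int) (L : PySem.Dict (Int × Int) Int)
    (p : String × String) (k : Int × Int) :
    (pvAStep agents L p).contains k = L.contains k := by
  rw [pvAStep_eq]
  cases h : pvCKey agents p with
  | none => rfl
  | some k' =>
      simp only
      split_ifs with hc
      · rw [PySem.Dict.contains_insert]
        by_cases hk : k = k'
        · subst hk; simp [hc]
        · simp [hk]
      · rfl

-- one A-step, pointwise on values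
theorem getD_pvAStep (agents : PySem.Dict String Int) (L : PySem.Dict (Int × Int) Int)
    (p : String × String) (k : Int × Int) :
    (pvAStep agents L p).getD k 0 =
      if L.contains k = true ∧ pvCKey agents p = some k then 1 else L.getD k 0 := by
  rw [pvAStep_eq]
  cases h : pvCKey agents p with
  | none => simp
  | some k' =>
      simp only
      split_ifs with hc hcond hcond
      · rw [PySem.Dict.getD_insert]
        rcases hcond with ⟨-, hk⟩
        obtain rfl := Option.some.inj hk
        simp
      · rw [PySem.Dict.getD_insert]
        split_ifs with hk
        · exact absurd ⟨by rwa [hk], by rw [hk]⟩ hcond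
        · rfl
      · rcases hcond with ⟨hck, hk⟩
        obtain rfl := Option.some.inj hk
        exact absurd hck hc
      · rfl

-- A's conflict loop does not change the key list
theorem keysA (agents : PySem.Dict String Int) :
    ∀ (cs : List (String × String)) (L : PySem.Dict (Int × Int) Int),
      (cs.foldl (pvAStep agents) L).keys = L.keys := by
  intro cs
  induction cs with
  | nil => intro L; rfl
  | cons p rest ih =>
      intro L
      rw [List.foldl_cons, ih, pvAStep_eq]
      cases h : pvCKey agents p with
      | none => rfl
      | some k =>
          simp only
          split_ifs with hc
          · exact PySem.Dict.keys_insert_of_contains L 1 hc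
          · rfl

-- A's conflict loop, pointwise on values
theorem getDA (agents : PySem.Dict String Int) :
    ∀ (cs : List (String × String)) (L : PySem.Dict (Int × Int) Int) (k : Int × Int),
      (cs.foldl (pvAStep agents) L).getD k 0 =
        if L.contains k = true ∧ ∃ p ∈ cs, pvCKey agents p = some k then 1 else L.getD k 0 := by
  intro cs
  induction cs with
  | nil => intro L k; simp
  | cons p rest ih =>
      intro L k
      rw [List.foldl_cons, ih, contains_pvAStep, getD_pvAStep]
      have hcons : (∃ q ∈ p :: rest, pvCKey agents q = some k) ↔
          pvCKey agents p = some k ∨ ∃ q ∈ rest, pvCKey agents q = some k := by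
        simp only [List.mem_cons]
        constructor
        · rintro ⟨q, (rfl | hq), hk⟩
          · exact Or.inl hk
          · exact Or.inr ⟨q, hq, hk⟩
        · rintro (hk | ⟨q, hq, hk⟩)
          · exact ⟨p, Or.inl rfl, hk⟩
          · exact ⟨q, Or.inr hq, hk⟩
      simp only [hcons]
      by_cases hC : L.contains k = true
      · by_cases hP : pvCKey agents p = some k <;>
          by_cases hR : ∃ q ∈ rest, pvCKey agents q = some k <;> simp [hC, hP, hR]
      · simp [hC]

-- insertion loops whose value is a function of the key, pointwise on values
theorem getD_foldl_insert_fn (v : (Int × Int) → Int) :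
    ∀ (es : List (Int × Int)) (D : PySem.Dict (Int × Int) Int) (k : Int × Int),
      (es.foldl (fun L e => L.insert e (v e)) D).getD k 0 = if k ∈ es then v k else D.getD k 0 := by
  intro es
  induction es with
  | nil => intro D k; simp
  | cons e rest ih =>
      intro D k
      rw [List.foldl_cons, ih, PySem.Dict.getD_insert]
      by_cases hm : k ∈ rest <;> by_cases he : k = e <;> simp [hm, he]

-- ===== VERDICT (by name: the statement is the Claim_ definition above) =====
theorem extract_labels_from_conflicts_spec : Claim_equal_extract_labels_from_conflicts := by
  intro conflicts agent_id_to_idx all_edges _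
  unfold Spec_extract_labels_from_conflicts extract_labels_from_conflicts extract_labels_from_conflicts_alt
  simp only
  congr 1
  set agents := PySem.Dict.mk agent_id_to_idx with hag
  set v : (Int × Int) → Int := fun e => if pvIsConflictEdge agents conflicts e then (1 : Int) else 0 with hv
  set L0 : PySem.Dict (Int × Int) Int :=
    all_edges.foldl (fun L e => L.insert e 0) PySem.Dict.empty with hL0
  -- rewrite B's dict comprehension as a fold with value function v
  have hofold : PySem.Dict.ofList (all_edges.map (fun e => (e, v e))) =
      all_edges.foldl (fun L e => L.insert e (v e)) PySem.Dict.empty := by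
    show (all_edges.map (fun e => (e, v e))).foldl
        (fun d p => d.insert p.1 p.2) PySem.Dict.empty = _
    rw [List.foldl_map]
  rw [hofold]
  set B : PySem.Dict (Int × Int) Int :=
    all_edges.foldl (fun L e => L.insert e (v e)) PySem.Dict.empty with hB
  -- key lists of both final dicts
  have hkL0 : L0.keys = PySem.Set.ofList all_edges := by
    rw [hL0]
    have := PySem.Dict.keys_foldl_insert (ν := Int) all_edges (fun _ _ => 0) PySem.Dict.empty
    simpa using this
  have hkA : (conflicts.foldl (pvAStep agents) L0).keys = PySem.Set.ofList all_edges := by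
    rw [keysA, hkL0]
  have hkB : B.keys = PySem.Set.ofList all_edges := by
    rw [hB]
    have := PySem.Dict.keys_foldl_insert (ν := Int) all_edges (fun d e => v e) PySem.Dict.empty
    simpa using this
  have hnodA : (conflicts.foldl (pvAStep agents) L0).keys.Nodup := by
    rw [hkA]; exact PySem.Set.nodup_ofList _
  have hnodB : B.keys.Nodup := by
    rw [hkB]; exact PySem.Set.nodup_ofList _
  rw [PySem.Dict.items_eq_map_keys _ hnodA 0, PySem.Dict.items_eq_map_keys _ hnodB 0, hkA, hkB]
  refine List.map_congr_left ?_
  intro k hk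
  have hkmem : k ∈ all_edges := (PySem.Set.mem_ofList _ _).mp hk
  congr 1
  -- the initial labels dict contains every edge key, mapped to 0
  have hc0 : L0.contains k = true := by
    rw [PySem.Dict.contains_eq_decide_mem_keys, hkL0]
    simp [PySem.Set.mem_ofList, hkmem]
  have h00 : L0.getD k 0 = 0 := by
    rw [hL0]
    have := getD_foldl_insert_fn (fun _ => 0) all_edges PySem.Dict.empty k
    simpa using this
  have hA : (conflicts.foldl (pvAStep agents) L0).getD k 0 =
      if ∃ p ∈ conflicts, pvCKey agents p = some k then 1 else 0 := by
    rw [getDA]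
    simp only [hc0, h00, true_and]
  have hBk : B.getD k 0 = v k := by
    rw [hB, getD_foldl_insert_fn]
    simp [hkmem]
  rw [hA, hBk, hv]
  by_cases hex : ∃ p ∈ conflicts, pvCKey agents p = some k
  · simp only [if_pos hex, (pvIsConflictEdge_iff agents conflicts k).mpr hex, if_true]
  · have hcf : pvIsConflictEdge agents conflicts k = false := by
      cases h' : pvIsConflictEdge agents conflicts k
      · rfl
      · exact absurd ((pvIsConflictEdge_iff agents conflicts k).mp h') hex
    simp only [if_neg hex, hcf, Bool.false_eq_true, if_false]
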